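-- pv_equiv track=rewrite | github.com/victor-ren/finguard-ai-compliance | finguard_engine.py | deterministic_risk
-- ===== SOURCE A (Python) =====
-- SEV_RANK = {"LOW": 0, "MEDIUM": 1, "HIGH": 2, "CRITICAL": 3}
--
-- def deterministic_risk(triggered_rules):
--     max_sev = 0
--     for tr in triggered_rules:
--         sev = tr.get("severity", "LOW")
--         max_sev = max(max_sev, SEV_RANK.get(sev, 0))
--     for k, v in SEV_RANK.items():
--         if v == max_sev:
--             return k
--     return "LOW"
-- ===== SOURCE B (Python) =====
-- def deterministic_risk(triggered_rules):
--     present = {tr.get("severity", "LOW") for tr in triggered_rules}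
--     for label in ("CRITICAL", "HIGH", "MEDIUM", "LOW"):
--         if label in present:
--             return label
--     return "LOW"
-- ===== Notes on version B (the rewrite author's own statement) =====
-- stated objective: simpler
-- what changed: B collects the set of severity labels present and returns the first hit in a fixed priority scan (CRITICAL,HIGH,MEDIUM,LOW), instead of folding to a numeric max rank and reverse-looking-up the rank in SEV_RANK.
import Mathlib
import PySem

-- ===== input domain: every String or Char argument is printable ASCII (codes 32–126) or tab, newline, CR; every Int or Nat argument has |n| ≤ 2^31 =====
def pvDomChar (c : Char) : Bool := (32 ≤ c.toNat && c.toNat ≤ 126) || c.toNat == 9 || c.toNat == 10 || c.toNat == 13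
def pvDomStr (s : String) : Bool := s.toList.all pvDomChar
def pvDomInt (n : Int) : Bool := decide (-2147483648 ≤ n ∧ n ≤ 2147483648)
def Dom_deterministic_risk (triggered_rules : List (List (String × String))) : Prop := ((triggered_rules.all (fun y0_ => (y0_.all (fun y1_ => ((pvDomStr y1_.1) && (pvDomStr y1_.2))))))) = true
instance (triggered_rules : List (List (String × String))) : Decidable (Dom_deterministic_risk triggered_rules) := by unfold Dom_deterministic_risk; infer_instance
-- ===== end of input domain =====

-- B replaces A's numeric max-rank fold + reverse rank lookup by a set of present labels
-- scanned against a fixed priority list; same results, simpler (objective: simpler).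

-- ===== PORT A =====
def SEV_RANK : PySem.Dict String Int :=
  PySem.Dict.mk [("LOW", 0), ("MEDIUM", 1), ("HIGH", 2), ("CRITICAL", 3)]

-- 'for k, v in SEV_RANK.items(): if v == max_sev: return k' then 'return "LOW"'
def drRevFind : List (String × Int) → Int → String
  | [], _ => "LOW"
  | (k, v) :: rest, m => if v = m then k else drRevFind rest m

def deterministic_risk (triggered_rules : List (List (String × String))) : String :=
  let max_sev := triggered_rules.foldl
    (fun m tr => max m (PySem.Dict.getD SEV_RANK (PySem.Dict.getD (PySem.Dict.mk tr) "severity" "LOW") 0)) 0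
  drRevFind (PySem.Dict.items SEV_RANK) max_sev

-- ===== PORT B =====
-- 'for label in ("CRITICAL","HIGH","MEDIUM","LOW"): if label in present: return label'
def drFirstPresent : List String → PySem.Set String → String
  | [], _ => "LOW"
  | l :: rest, present => if PySem.Set.contains present l then l else drFirstPresent rest present

def deterministic_risk_alt (triggered_rules : List (List (String × String))) : String :=
  let present := PySem.Set.ofList
    (triggered_rules.map (fun tr => PySem.Dict.getD (PySem.Dict.mk tr) "severity" "LOW"))
  drFirstPresent ["CRITICAL", "HIGH", "MEDIUM", "LOW"] present

-- ===== PRECONDITION & SPEC =====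
def Spec_deterministic_risk (triggered_rules : List (List (String × String))) (out : String) : Prop := out = deterministic_risk_alt triggered_rules
instance (triggered_rules : List (List (String × String))) (out : String) : Decidable (Spec_deterministic_risk triggered_rules out) := by unfold Spec_deterministic_risk; infer_instance

-- ===== CLAIM (what is proved, stated in full; the proofs are below) =====
def Claim_equal_deterministic_risk : Prop := ∀ (triggered_rules : List (List (String × String))), Dom_deterministic_risk triggered_rules → Spec_deterministic_risk triggered_rules (deterministic_risk triggered_rules)

-- ===== LEMMAS AND PROOFS =====

def drRank (s : String) : Int := PySem.Dict.getD SEV_RANK s 0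

-- the maximum severity rank present in l, as a membership case split
def drTgt (l : List String) : Int :=
  if "CRITICAL" ∈ l then 3 else if "HIGH" ∈ l then 2 else if "MEDIUM" ∈ l then 1 else 0

theorem drTgt_nonneg (l : List String) : 0 ≤ drTgt l := by
  unfold drTgt; split_ifs <;> omega

theorem drRank_eq (s : String) :
    drRank s = (if s = "CRITICAL" then 3 else if s = "HIGH" then 2 else if s = "MEDIUM" then 1 else 0) := by
  by_cases h0 : s = "LOW"
  · subst h0; decide
  by_cases h1 : s = "MEDIUM"
  · subst h1; decide
  by_cases h2 : s = "HIGH"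
  · subst h2; decide
  by_cases h3 : s = "CRITICAL"
  · subst h3; decide
  · have e0 : ("LOW" == s) = false := beq_eq_false_iff_ne.mpr (Ne.symm h0)
    have e1 : ("MEDIUM" == s) = false := beq_eq_false_iff_ne.mpr (Ne.symm h1)
    have e2 : ("HIGH" == s) = false := beq_eq_false_iff_ne.mpr (Ne.symm h2)
    have e3 : ("CRITICAL" == s) = false := beq_eq_false_iff_ne.mpr (Ne.symm h3)
    simp [drRank, SEV_RANK, PySem.Dict.getD, PySem.Dict.get?, List.find?, e0, e1, e2, e3, h1, h2, h3]

theorem drTgt_cons (s : String) (l : List String) :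
    drTgt (s :: l) = max (drRank s) (drTgt l) := by
  rw [drRank_eq]
  by_cases h3 : s = "CRITICAL"
  · subst h3; simp [drTgt]; split_ifs <;> decide
  by_cases h2 : s = "HIGH"
  · subst h2; simp [drTgt, List.mem_cons, h3]; split_ifs <;> decide
  by_cases h1 : s = "MEDIUM"
  · subst h1; simp [drTgt, List.mem_cons]; split_ifs <;> decide
  · simp [drTgt, List.mem_cons, h1, h2, h3, Ne.symm h1, Ne.symm h2, Ne.symm h3]
    split_ifs <;> decide

theorem drFold (l : List String) (a : Int) (ha : 0 ≤ a) :
    l.foldl (fun m s => max m (drRank s)) a = max a (drTgt l) := by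
  induction l generalizing a with
  | nil => simp [drTgt, max_eq_left ha]
  | cons s l ih =>
      have h : 0 ≤ max a (drRank s) := le_trans ha (le_max_left _ _)
      simp only [List.foldl_cons, ih _ h, drTgt_cons, max_assoc]

-- ===== VERDICT (by name: the statement is the Claim_ definition above) =====
theorem deterministic_risk_spec : Claim_equal_deterministic_risk := by
  intro tr _
  show deterministic_risk tr = deterministic_risk_alt tr
  have key : ∀ l : List String, l.foldl (fun m s => max m (drRank s)) 0 = drTgt l := by
    intro l; rw [drFold _ _ le_rfl, max_eq_right (drTgt_nonneg _)]
  show drRevFind (PySem.Dict.items SEV_RANK)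
      (List.foldl (fun m t => max m (drRank (PySem.Dict.getD (PySem.Dict.mk t) "severity" "LOW"))) 0 tr)
      = drFirstPresent ["CRITICAL", "HIGH", "MEDIUM", "LOW"]
          (PySem.Set.ofList (tr.map (fun t => PySem.Dict.getD (PySem.Dict.mk t) "severity" "LOW")))
  rw [← List.foldl_map (g := fun (m : Int) s => max m (drRank s)) (f := fun t : List (String × String) => PySem.Dict.getD (PySem.Dict.mk t) "severity" "LOW"), key]
  generalize (tr.map (fun t => PySem.Dict.getD (PySem.Dict.mk t) "severity" "LOW")) = sevs
  by_cases h3 : "CRITICAL" ∈ sevs <;> by_cases h2 : "HIGH" ∈ sevs <;>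
    by_cases h1 : "MEDIUM" ∈ sevs <;>
    simp_all [drTgt, drRevFind, drFirstPresent, SEV_RANK,
      PySem.Set.contains, PySem.Set.mem_ofList]
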